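-- pv_equiv track=rewrite | github.com/Imen-ys/TP_ALGO | Back_end/app.py | get_extraction_sequence
-- ===== SOURCE A (Python) =====
-- def get_extraction_sequence(heap):
--     if not heap:
--         return []
--     heap_copy = heap.copy()
--     sequence = []
--     while heap_copy:
--         min_val = heap_copy[0]
--         sequence.append(min_val)
--         heap_copy[0] = heap_copy[-1]
--         heap_copy.pop()
--         if heap_copy:
--             heapify(heap_copy, 0)
--     return sequence
--
-- def heapify(heap, i):
--     n = len(heap)
--     smallest = i
--     left = 2 * i + 1
--     right = 2 * i + 2
--     if left < n and heap[left] < heap[smallest]: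
--         smallest = left
--     if right < n and heap[right] < heap[smallest]:
--         smallest = right
--     if smallest != i:
--         heap[i], heap[smallest] = heap[smallest], heap[i]
--         heapify(heap, smallest)
-- ===== SOURCE B (Python) =====
-- def get_extraction_sequence(heap):
--     # Heapsort-style: one fixed-size array, swap root with the active tail slot,
--     # iterative sift-down bounded by the active size, output read off by reversing.
--     a = list(heap)
--     for end in range(len(a) - 1, -1, -1):
--         a[0], a[end] = a[end], a[0]
--         i = 0
--         while True:
--             left = 2 * i + 1
--             right = 2 * i + 2
--             s = i
--             if left < end and a[left] < a[s]:
--                 s = left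
--             if right < end and a[right] < a[s]:
--                 s = right
--             if s == i:
--                 break
--             a[i], a[s] = a[s], a[i]
--             i = s
--     return a[::-1]
-- ===== Notes on version B (the rewrite author's own statement) =====
-- stated objective: alternative
-- what changed: Replaces A's pop-and-rebuild extraction (move last to root, pop, recursive heapify) by a heapsort-style in-place pass: swap root with the active tail slot on one fixed array, iterative bounded sift-down, and read the answer off by reversing the array at the end.
import Mathlib
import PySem

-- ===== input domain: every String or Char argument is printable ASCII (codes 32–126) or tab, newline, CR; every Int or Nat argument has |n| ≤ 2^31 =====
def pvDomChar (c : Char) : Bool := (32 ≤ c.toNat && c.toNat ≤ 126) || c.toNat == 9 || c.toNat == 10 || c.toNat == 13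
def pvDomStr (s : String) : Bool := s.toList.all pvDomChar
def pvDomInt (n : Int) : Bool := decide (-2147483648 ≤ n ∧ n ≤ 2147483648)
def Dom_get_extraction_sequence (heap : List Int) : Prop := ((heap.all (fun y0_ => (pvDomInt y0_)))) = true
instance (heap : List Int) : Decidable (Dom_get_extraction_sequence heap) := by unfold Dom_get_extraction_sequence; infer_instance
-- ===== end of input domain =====

-- B replaces A's pop-and-rebuild extraction by a heapsort-style pass on one fixed array
-- (swap root with the active tail slot, iterative bounded sift-down, reverse at the end);
-- same cost class, different decomposition. A works on a copy, so no argument is mutated.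

-- ===== PORT A =====
-- the child-selection of A's heapify: the two sequential `if ... < ...` tests, in order
-- (written as the case expansion of `smallest := i; if ...: smallest := left; if ...: smallest := right`);
-- every index used is guarded in range, so List.getD is exact for Python's heap[j]
def smallestA (heap : List Int) (i : Nat) : Nat :=
  if 2*i+1 < heap.length ∧ heap.getD (2*i+1) 0 < heap.getD i 0 then
    (if 2*i+2 < heap.length ∧ heap.getD (2*i+2) 0 < heap.getD (2*i+1) 0 then 2*i+2 else 2*i+1)
  else
    (if 2*i+2 < heap.length ∧ heap.getD (2*i+2) 0 < heap.getD i 0 then 2*i+2 else i)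

theorem smallestA_ne (heap : List Int) (i : Nat) (h : smallestA heap i ≠ i) :
    i < smallestA heap i ∧ smallestA heap i < heap.length := by
  unfold smallestA at *
  split_ifs at * <;> omega

def heapifyA (heap : List Int) (i : Nat) : List Int :=
  if _h : smallestA heap i = i then heap
  else
    -- the simultaneous swap heap[i], heap[smallest] = heap[smallest], heap[i], then recurse
    heapifyA ((heap.set i (heap.getD (smallestA heap i) 0)).set (smallestA heap i)
              (heap.getD i 0)) (smallestA heap i)
termination_by heap.length - i
decreasing_by
  have := smallestA_ne heap i _h
  simp only [List.length_set]; omega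

theorem heapifyA_length (heap : List Int) (i : Nat) : (heapifyA heap i).length = heap.length := by
  fun_induction heapifyA heap i with
  | case1 => rfl
  | case2 heap i h ih => simpa using ih

def extractLoopA (hc : List Int) (seq : List Int) : List Int :=
  if h : hc = [] then seq
  else
    -- heap_copy[0] = heap_copy[-1]; heap_copy.pop(); if heap_copy: heapify(heap_copy, 0)
    extractLoopA
      (if (hc.set 0 (hc.getD (hc.length - 1) 0)).dropLast = []
       then (hc.set 0 (hc.getD (hc.length - 1) 0)).dropLast
       else heapifyA ((hc.set 0 (hc.getD (hc.length - 1) 0)).dropLast) 0)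
      (seq ++ [hc.getD 0 0])
termination_by hc.length
decreasing_by
  have hpos : 0 < hc.length := List.length_pos_iff.mpr h
  split
  · simp only [List.length_dropLast, List.length_set]; omega
  · rw [heapifyA_length]; simp only [List.length_dropLast, List.length_set]; omega

def get_extraction_sequence (heap : List Int) : List Int :=
  if heap = [] then [] else extractLoopA heap []

-- ===== PORT B =====
-- the child-selection inside Source B's while loop, bounded by the active size (same case expansion)
def smallestB (a : List Int) (i : Nat) (size : Nat) : Nat :=
  if 2*i+1 < size ∧ a.getD (2*i+1) 0 < a.getD i 0 then
    (if 2*i+2 < size ∧ a.getD (2*i+2) 0 < a.getD (2*i+1) 0 then 2*i+2 else 2*i+1)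
  else
    (if 2*i+2 < size ∧ a.getD (2*i+2) 0 < a.getD i 0 then 2*i+2 else i)

theorem smallestB_ne (a : List Int) (i size : Nat) (h : smallestB a i size ≠ i) :
    i < smallestB a i size ∧ smallestB a i size < size := by
  unfold smallestB at *
  split_ifs at * <;> omega

-- the `while True` sift-down of Source B, as tail recursion on the loop state (a, i)
def siftB (a : List Int) (i : Nat) (size : Nat) : List Int :=
  if _h : smallestB a i size = i then a
  else
    siftB ((a.set i (a.getD (smallestB a i size) 0)).set (smallestB a i size)
           (a.getD i 0)) (smallestB a i size) size
termination_by size - i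
decreasing_by
  have := smallestB_ne a i size _h
  omega

-- the `for end in range(len(a)-1, -1, -1)` loop; k = end + 1 counts remaining iterations
def heapsortLoopB (a : List Int) (k : Nat) : List Int :=
  match k with
  | 0 => a
  | e+1 => heapsortLoopB (siftB ((a.set 0 (a.getD e 0)).set e (a.getD 0 0)) 0 e) e

def get_extraction_sequence_alt (heap : List Int) : List Int :=
  (heapsortLoopB heap heap.length).reverse

-- ===== PRECONDITION & SPEC =====
def Spec_get_extraction_sequence (heap : List Int) (out : List Int) : Prop := out = get_extraction_sequence_alt heap
instance (heap : List Int) (out : List Int) : Decidable (Spec_get_extraction_sequence heap out) := by unfold Spec_get_extraction_sequence; infer_instance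

-- ===== CLAIM (what is proved, stated in full; the proofs are below) =====
def Claim_equal_get_extraction_sequence : Prop := ∀ (heap : List Int), Dom_get_extraction_sequence heap → Spec_get_extraction_sequence heap (get_extraction_sequence heap)

-- ===== LEMMAS AND PROOFS =====

theorem smallest_agree (l tail : List Int) (i : Nat) :
    smallestB (l ++ tail) i l.length = smallestA l i := by
  unfold smallestA smallestB
  by_cases h1 : 2*i+1 < l.length
  · have hi : i < l.length := by omega
    rw [List.getD_append _ _ _ _ h1, List.getD_append _ _ _ _ hi]
    by_cases h2 : 2*i+2 < l.length
    · rw [List.getD_append _ _ _ _ h2]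
    · simp [h2]
  · have h2 : ¬ 2*i+2 < l.length := by omega
    simp [h1, h2]

theorem sift_append (l tail : List Int) (i : Nat) :
    siftB (l ++ tail) i l.length = heapifyA l i ++ tail := by
  fun_induction heapifyA l i with
  | case1 l i h =>
      rw [siftB, dif_pos (by rw [smallest_agree]; exact h)]
  | case2 l i h ih =>
      rw [siftB, dif_neg (by rw [smallest_agree]; exact h)]
      obtain ⟨hgt, hlt⟩ := smallestA_ne l i h
      have hi : i < l.length := by omega
      rw [smallest_agree, List.getD_append _ _ _ _ hlt, List.getD_append _ _ _ _ hi,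
          List.set_append_left _ _ hi, List.set_append_left _ _ (by simpa using hlt)]
      have hlen : ((l.set i (l.getD (smallestA l i) 0)).set (smallestA l i) (l.getD i 0)).length
          = l.length := by simp
      rw [show l.length = ((l.set i (l.getD (smallestA l i) 0)).set (smallestA l i)
            (l.getD i 0)).length from hlen.symm]
      exact ih

theorem heapifyA_nil (i : Nat) : heapifyA [] i = [] := by
  rw [heapifyA, dif_pos (by simp [smallestA])]

theorem set_last (l : List Int) (x : Int) (h : l ≠ []) :
    l.set (l.length - 1) x = l.dropLast ++ [x] := by
  induction l with
  | nil => simp at h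
  | cons a t ih =>
      cases t with
      | nil => simp
      | cons b t' =>
          have hh : (a :: b :: t').length - 1 = ((b :: t').length - 1) + 1 := by
            simp
          rw [hh]
          simp only [List.set_cons_succ, List.dropLast_cons₂, List.cons_append]
          rw [ih (by simp)]

theorem loop_agree (n : Nat) : ∀ (hc seq : List Int), hc.length = n →
    extractLoopA hc seq = (heapsortLoopB (hc ++ seq.reverse) hc.length).reverse := by
  induction n using Nat.strong_induction_on with
  | _ n ih =>
    intro hc seq hn
    by_cases hne : hc = []
    · subst hne
      rw [extractLoopA, dif_pos rfl]
      simp [heapsortLoopB]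
    · obtain ⟨e, he⟩ : ∃ e, hc.length = e + 1 := by
        cases hc with
        | nil => exact absurd rfl hne
        | cons a t => exact ⟨t.length, by simp⟩
      have he' : e < hc.length := by omega
      have h0 : 0 < hc.length := by omega
      rw [extractLoopA, dif_neg hne]
      have hm1 : hc.length - 1 = e := by omega
      rw [hm1]
      conv_rhs => rw [he]
      rw [heapsortLoopB]
      rw [List.getD_append _ _ _ _ he', List.getD_append _ _ _ _ h0,
          List.set_append_left _ _ h0, List.set_append_left _ _ (by simpa using he')]
      have hslen : (hc.set 0 (hc.getD e 0)).length = e + 1 := by simp [he]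
      have hslast : (hc.set 0 (hc.getD e 0)).set e (hc.getD 0 0)
          = (hc.set 0 (hc.getD e 0)).dropLast ++ [hc.getD 0 0] := by
        have hx := set_last (hc.set 0 (hc.getD e 0)) (hc.getD 0 0)
          (by intro hx; have hy := congrArg List.length hx; simp [he] at hy)
        rwa [hslen] at hx
      rw [hslast]
      have hlen1 : ((hc.set 0 (hc.getD e 0)).dropLast).length = e := by
        simp [he]
      have hsift : siftB ((hc.set 0 (hc.getD e 0)).dropLast
            ++ ([hc.getD 0 0] ++ seq.reverse)) 0 e
          = heapifyA ((hc.set 0 (hc.getD e 0)).dropLast) 0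
            ++ ([hc.getD 0 0] ++ seq.reverse) := by
        have hx := sift_append ((hc.set 0 (hc.getD e 0)).dropLast)
          ([hc.getD 0 0] ++ seq.reverse) 0
        rwa [hlen1] at hx
      have hc2eq : (if (hc.set 0 (hc.getD e 0)).dropLast = []
            then (hc.set 0 (hc.getD e 0)).dropLast
            else heapifyA ((hc.set 0 (hc.getD e 0)).dropLast) 0)
          = heapifyA ((hc.set 0 (hc.getD e 0)).dropLast) 0 := by
        split
        · rename_i hx; rw [hx, heapifyA_nil]
        · rfl
      have hlen2 : (heapifyA ((hc.set 0 (hc.getD e 0)).dropLast) 0).length = e := by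
        rw [heapifyA_length, hlen1]
      rw [List.append_assoc, hsift, hc2eq]
      rw [ih e (by omega) _ (seq ++ [hc.getD 0 0]) hlen2, hlen2]
      simp

-- ===== VERDICT (by name: the statement is the Claim_ definition above) =====
theorem get_extraction_sequence_spec : Claim_equal_get_extraction_sequence := by
  intro heap _
  unfold Spec_get_extraction_sequence get_extraction_sequence get_extraction_sequence_alt
  split
  · rename_i h; subst h; simp [heapsortLoopB]
  · rw [loop_agree heap.length heap [] rfl]; simp
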